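-- pv_equiv track=rewrite | github.com/krupalhp2907/algorithms | oth/prime_string.py | primeString
-- ===== SOURCE A (Python) =====
-- from math import sqrt
-- from itertools import count, islice
--
-- def isPrime(n):
--     return n > 1 and all(n % i for i in islice(count(2), int(sqrt(n) - 1)))
--
-- def primeString(arr):
--     dist = {}
--     for x in arr:
--         if x in dist:
--             dist[x] += 1
--         else:
--             dist[x] = 1
--
--     for x in dist:
--         if isPrime(dist[x]) == False:
--             return "NO"
--
--     return "YES" if isPrime(len(dist)) == True else "NO"
-- ===== SOURCE B (Python) =====
-- from math import sqrt
--
-- def primeString(arr):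
--     # Count frequencies, then answer all primality questions (each frequency
--     # and the number of distinct values) with one Sieve of Eratosthenes.
--     freq = {}
--     for x in arr:
--         freq[x] = freq.get(x, 0) + 1
--     targets = list(freq.values()) + [len(freq)]
--     m = max(targets)
--     sieve = [False, False] + [True] * (m - 1)
--     for p in range(2, int(sqrt(m)) + 1):
--         for q in range(2 * p, m + 1, p):
--             sieve[q] = False
--     return "YES" if all(sieve[t] for t in targets) else "NO"
-- ===== Notes on version B (the rewrite author's own statement) =====
-- stated objective: alternative
-- what changed: B replaces A's per-key trial-division primality test with early return by collecting all numbers whose primality matters (every frequency plus the distinct count), building one Sieve of Eratosthenes up to their maximum, and answering every primality question by indexing into the sieve.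
import Mathlib
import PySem

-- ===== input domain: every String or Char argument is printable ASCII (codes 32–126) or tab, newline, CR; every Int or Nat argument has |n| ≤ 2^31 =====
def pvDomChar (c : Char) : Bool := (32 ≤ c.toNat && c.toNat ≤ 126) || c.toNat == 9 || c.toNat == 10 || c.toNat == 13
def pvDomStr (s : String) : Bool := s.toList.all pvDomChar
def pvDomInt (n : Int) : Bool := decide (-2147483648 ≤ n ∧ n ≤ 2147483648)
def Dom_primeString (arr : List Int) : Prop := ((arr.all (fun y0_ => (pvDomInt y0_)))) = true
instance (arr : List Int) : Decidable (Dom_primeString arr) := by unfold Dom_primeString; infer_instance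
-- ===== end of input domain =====

-- B answers all primality questions (every frequency and the distinct count) from one
-- Sieve of Eratosthenes over [0..max], instead of A's per-key trial division with early return.


-- ===== PORT A =====
-- isPrime(n): 'n > 1 and all(n % i for i in islice(count(2), int(sqrt(n) - 1)))';
-- the islice is range(2, 2 + (int(sqrt(n) - 1))); int(sqrt(n) - 1) = Nat.sqrt n - 1 here
-- (n is a count or a dict length, so 0 ≤ n and float sqrt is exact at these magnitudes);
-- the 'and' short-circuits, mirrored by the if.
def pvIsPrime (n : Int) : Bool :=
  if n > 1 then
    (PySem.List.pyRange 2 (2 + ((Nat.sqrt n.toNat : Int) - 1)) 1).all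
      (fun i => PySem.Int.mod n i != 0)
  else false

-- the early-returning 'for x in dist' loop; dist[x] is getD (x is a key of dist, so exact)
def pvCheckA (d : PySem.Dict Int Int) : List Int → Option String
  | [] => none
  | x :: ks => if pvIsPrime (d.getD x 0) == false then some "NO" else pvCheckA d ks

def primeString (arr : List Int) : String :=
  let dist := arr.foldl
    (fun d x => if d.contains x then d.insert x (d.getD x 0 + 1) else d.insert x 1)
    PySem.Dict.empty
  match pvCheckA dist dist.keys with
  | some s => s
  | none => if pvIsPrime (dist.size : Int) == true then "YES" else "NO"

-- ===== PORT B =====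
-- int(sqrt(m)) = Nat.sqrt m.toNat (0 ≤ m always; float sqrt exact at these magnitudes);
-- [True] * (m - 1) is empty for m - 1 < 0, matching (m - 1).toNat; sieve[q] = False has
-- 0 ≤ q, so q.toNat is exact; sieve[t] is always in range, so the .getD false is never used.
def primeString_alt (arr : List Int) : String :=
  let freq := arr.foldl (fun d x => d.insert x (d.getD x 0 + 1)) PySem.Dict.empty
  let targets := freq.values ++ [(freq.size : Int)]
  let m := (PySem.List.max? targets (fun t => t)).getD 0
  let sieve0 : List Bool := [false, false] ++ List.replicate (m - 1).toNat true
  let sieve := (PySem.List.pyRange 2 ((Nat.sqrt m.toNat : Int) + 1) 1).foldl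
    (fun s p => (PySem.List.pyRange (2 * p) (m + 1) p).foldl
      (fun s q => s.set q.toNat false) s) sieve0
  if targets.all (fun t => (PySem.List.pyGet? sieve t).getD false) then "YES" else "NO"

-- ===== PRECONDITION & SPEC =====
def Spec_primeString (arr : List Int) (out : String) : Prop := out = primeString_alt arr
instance (arr : List Int) (out : String) : Decidable (Spec_primeString arr out) := by unfold Spec_primeString; infer_instance

-- ===== CLAIM (what is proved, stated in full; the proofs are below) =====
def Claim_equal_primeString : Prop := ∀ (arr : List Int), Dom_primeString arr → Spec_primeString arr (primeString arr)

-- ===== LEMMAS AND PROOFS =====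

-- A's trial division decides primality of n.toNat (for 0 ≤ n)
theorem pvIsPrime_eq_decide (n : Int) (hn : 0 ≤ n) :
    pvIsPrime n = decide (Nat.Prime n.toNat) := by
  by_cases h2 : n > 1
  · have hN : 2 ≤ n.toNat := by omega
    simp only [pvIsPrime, if_pos h2]
    rw [show (2 : Int) + ((Nat.sqrt n.toNat : Int) - 1) = (Nat.sqrt n.toNat : Int) + 1 by ring]
    rw [Bool.eq_iff_iff, List.all_eq_true, decide_eq_true_iff, Nat.prime_def_le_sqrt]
    constructor
    · intro h
      refine ⟨hN, fun d hd2 hdsqrt hdvd => ?_⟩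
      have hmem : (d : Int) ∈ PySem.List.pyRange 2 ((Nat.sqrt n.toNat : Int) + 1) 1 := by
        rw [PySem.List.mem_pyRange_one]
        refine ⟨by omega, by omega⟩
      have hne := h _ hmem
      simp only [bne_iff_ne, ne_eq] at hne
      apply hne
      rw [PySem.Int.mod_eq_zero_iff_dvd]
      have hdd : (d : Int) ∣ (n.toNat : Int) := Int.natCast_dvd_natCast.mpr hdvd
      rwa [Int.toNat_of_nonneg hn] at hdd
    · intro hp i hi
      rw [PySem.List.mem_pyRange_one] at hi
      simp only [bne_iff_ne, ne_eq]
      intro hmod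
      rw [PySem.Int.mod_eq_zero_iff_dvd] at hmod
      refine hp.2 i.toNat (by omega) (by omega) ?_
      have hdd : (i.toNat : Int) ∣ (n.toNat : Int) := by
        rwa [Int.toNat_of_nonneg (by omega : (0:Int) ≤ i), Int.toNat_of_nonneg hn]
      exact_mod_cast hdd
  · simp only [pvIsPrime, if_neg h2]
    have hnp : ¬ Nat.Prime n.toNat := fun hp => by have := hp.two_le; omega
    simp [hnp]

theorem pvSet_getD (s : List Bool) (j i : Nat) :
    (s.set j false).getD i false = if j == i then false else s.getD i false := by
  simp only [List.getD_eq_getElem?_getD, List.getElem?_set, beq_iff_eq]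
  split_ifs with h1 h2 <;> simp

theorem pvInner_getD (l : List Int) (s : List Bool) (i : Nat) :
    (l.foldl (fun s q => s.set q.toNat false) s).getD i false =
      if l.any (fun q => q.toNat == i) then false else s.getD i false := by
  induction l generalizing s with
  | nil => simp
  | cons x l ih =>
    simp only [List.foldl_cons, List.any_cons, ih, pvSet_getD]
    by_cases h1 : x.toNat = i <;> by_cases h2 : l.any (fun q => q.toNat == i) <;> simp_all

theorem pvOuter_getD (g : Int → List Int) (ps : List Int) (s : List Bool) (i : Nat) :
    (ps.foldl (fun s p => (g p).foldl (fun s q => s.set q.toNat false) s) s).getD i false =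
      if ps.any (fun p => (g p).any (fun q => q.toNat == i)) then false else s.getD i false := by
  induction ps generalizing s with
  | nil => simp
  | cons p ps ih =>
    simp only [List.foldl_cons, List.any_cons, ih, pvInner_getD]
    by_cases h1 : (g p).any (fun q => q.toNat == i) <;>
      by_cases h2 : ps.any (fun p => (g p).any (fun q => q.toNat == i)) <;>
        simp_all [Bool.and_left_comm, Bool.and_assoc]

theorem pvSieve0_getD (k i : Nat) :
    (([false, false] ++ List.replicate k true).getD i false) = decide (2 ≤ i ∧ i < 2 + k) := by
  match i with
  | 0 => simp
  | 1 => simp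
  | (j+2) =>
    simp only [List.getD_eq_getElem?_getD]
    show ((List.replicate k true)[j]?).getD false = _
    simp [List.getElem?_replicate]
    split_ifs with h <;> simp <;> omega

theorem pvCheckA_eq (d : PySem.Dict Int Int) (ks : List Int) :
    pvCheckA d ks = if ks.all (fun x => pvIsPrime (d.getD x 0)) then none else some "NO" := by
  induction ks with
  | nil => simp [pvCheckA]
  | cons x ks ih =>
    simp only [pvCheckA, List.all_cons, ih]
    by_cases h : pvIsPrime (d.getD x 0) <;> simp [h]

-- the finished sieve decides primality at every index 0 ≤ t ≤ m
theorem pvSieve_getD (m t : Int) (ht0 : 0 ≤ t) (htm : t ≤ m) :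
    ((PySem.List.pyRange 2 ((Nat.sqrt m.toNat : Int) + 1) 1).foldl
      (fun s p => (PySem.List.pyRange (2 * p) (m + 1) p).foldl
        (fun s q => s.set q.toNat false) s)
      ([false, false] ++ List.replicate (m - 1).toNat true)).getD t.toNat false =
      decide (Nat.Prime t.toNat) := by
  rw [pvOuter_getD, pvSieve0_getD]
  by_cases hP : Nat.Prime t.toNat
  · have h2 : (2:Int) ≤ t := by have := hP.two_le; omega
    have hany : (PySem.List.pyRange 2 ((Nat.sqrt m.toNat : Int) + 1) 1).any
        (fun p => (PySem.List.pyRange (2 * p) (m + 1) p).any (fun q => q.toNat == t.toNat))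
        = false := by
      rw [Bool.eq_false_iff, Ne, List.any_eq_true]
      rintro ⟨p, hp, hq⟩
      rw [List.any_eq_true] at hq
      obtain ⟨q, hqmem, hqeq⟩ := hq
      rw [PySem.List.mem_pyRange_one] at hp
      rw [beq_iff_eq] at hqeq
      have hppos : (0:Int) < p := by omega
      rw [PySem.List.mem_pyRange_iff_of_pos hppos] at hqmem
      obtain ⟨hq1, hq2, hq3⟩ := hqmem
      have hqt : q = t := by omega
      subst hqt
      have hdq : p ∣ q := by
        have hsum := dvd_add hq3 (dvd_mul_left p 2)
        simpa using hsum
      have hdn : p.toNat ∣ q.toNat := by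
        rw [← Int.toNat_of_nonneg hppos.le, ← Int.toNat_of_nonneg (by omega : (0:Int) ≤ q),
          Int.natCast_dvd_natCast] at hdq
        exact hdq
      rcases (Nat.Prime.eq_one_or_self_of_dvd hP p.toNat hdn) with h1 | h1 <;> omega
    rw [hany]
    simp only [hP, decide_true]
    simp only [Bool.if_false_left]
    simp
    omega
  · by_cases h2 : (2:Int) ≤ t
    · have hT2 : 2 ≤ t.toNat := by omega
      have hdex : ∃ d, 2 ≤ d ∧ d ≤ Nat.sqrt t.toNat ∧ d ∣ t.toNat := by
        by_contra hcon
        exact hP (Nat.prime_def_le_sqrt.mpr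
          ⟨hT2, fun d hd2 hdle hdvd => hcon ⟨d, hd2, hdle, hdvd⟩⟩)
      obtain ⟨d, hd2, hdle, hdvd⟩ := hdex
      have hsle : Nat.sqrt t.toNat ≤ Nat.sqrt m.toNat := Nat.sqrt_le_sqrt (by omega)
      have hdd : d * d ≤ t.toNat := Nat.le_sqrt.mp hdle
      have h2d : 2 * d ≤ d * d := Nat.mul_le_mul_right d hd2
      have hdvdInt : (d : Int) ∣ t := by
        have := Int.natCast_dvd_natCast.mpr hdvd
        rwa [Int.toNat_of_nonneg ht0] at this
      have hany : (PySem.List.pyRange 2 ((Nat.sqrt m.toNat : Int) + 1) 1).any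
          (fun p => (PySem.List.pyRange (2 * p) (m + 1) p).any (fun q => q.toNat == t.toNat))
          = true := by
        rw [List.any_eq_true]
        refine ⟨(d : Int), ?_, ?_⟩
        · rw [PySem.List.mem_pyRange_one]
          refine ⟨by omega, by omega⟩
        · rw [List.any_eq_true]
          refine ⟨t, ?_, by simp⟩
          rw [PySem.List.mem_pyRange_iff_of_pos (by omega : (0:Int) < (d:Int))]
          refine ⟨by omega, by omega, ?_⟩
          exact dvd_sub hdvdInt (dvd_mul_left _ 2)
      rw [hany]
      simp [hP]
    · have hnp : ¬ (2 ≤ t.toNat ∧ t.toNat < 2 + (m - 1).toNat) := by omega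
      split
      · simp [hP]
      · simp [hP]
        omega

theorem pvAll_congr {α : Type} (l : List α) (f g : α → Bool)
    (h : ∀ x ∈ l, f x = g x) : l.all f = l.all g := by
  induction l with
  | nil => rfl
  | cons x l ih =>
    simp only [List.all_cons, h x (by simp), ih (fun y hy => h y (by simp [hy]))]

-- A's dict-building loop is Counter(arr)
theorem pvDistA_eq_counter (arr : List Int) :
    arr.foldl
      (fun d x => if d.contains x then d.insert x (d.getD x 0 + 1) else d.insert x 1)
      PySem.Dict.empty = PySem.Dict.counter arr := by
  have hfun : (fun (d : PySem.Dict Int Int) (x : Int) =>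
      if d.contains x then d.insert x (d.getD x 0 + 1) else d.insert x 1) =
      (fun (d : PySem.Dict Int Int) (x : Int) => d.insert x (d.getD x 0 + 1)) := by
    funext d x
    by_cases h : d.contains x
    · simp [h]
    · rw [if_neg (by simp [h]),
        PySem.Dict.getD_of_not_contains _ _ (by simpa using h)]
      norm_num
  rw [hfun, PySem.Dict.foldl_insert_getD_add_one_eq_counter]

theorem pvValues_nonneg (arr : List Int) :
    ∀ v ∈ (PySem.Dict.counter arr).values, 0 ≤ v := by
  intro v hv
  rw [PySem.Dict.values_eq_map_keys _ (PySem.Dict.nodup_keys_counter arr) 0] at hv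
  obtain ⟨k, _, hk⟩ := List.mem_map.mp hv
  rw [PySem.Dict.getD_counter] at hk
  omega

-- A's side reduces to 'every target is prime'
theorem pvA_eq (arr : List Int) :
    primeString arr =
      if ((PySem.Dict.counter arr).values ++ [((PySem.Dict.counter arr).size : Int)]).all
          (fun t => decide (Nat.Prime t.toNat)) then "YES" else "NO" := by
  simp only [primeString, pvDistA_eq_counter, pvCheckA_eq]
  have hkeys : (PySem.Dict.counter arr).keys.all
      (fun x => pvIsPrime ((PySem.Dict.counter arr).getD x 0)) =
      (PySem.Dict.counter arr).values.all (fun t => decide (Nat.Prime t.toNat)) := by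
    rw [PySem.Dict.values_eq_map_keys _ (PySem.Dict.nodup_keys_counter arr) 0, List.all_map]
    refine pvAll_congr _ _ _ (fun k _ => ?_)
    simp only [Function.comp]
    rw [pvIsPrime_eq_decide _ (by rw [PySem.Dict.getD_counter]; omega)]
  have hsize : pvIsPrime ((PySem.Dict.counter arr).size : Int) =
      decide (Nat.Prime (((PySem.Dict.counter arr).size : Int)).toNat) :=
    pvIsPrime_eq_decide _ (by omega)
  rw [List.all_append]
  by_cases hall : (PySem.Dict.counter arr).values.all (fun t => decide (Nat.Prime t.toNat))
  · rw [hkeys.trans (by rw [hall])]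
    simp [hsize, hall]
  · rw [hkeys.trans (by rw [Bool.eq_false_iff.mpr hall])]
    simp [hall]

-- B's side reduces to the same
theorem pvB_eq (arr : List Int) :
    primeString_alt arr =
      if ((PySem.Dict.counter arr).values ++ [((PySem.Dict.counter arr).size : Int)]).all
          (fun t => decide (Nat.Prime t.toNat)) then "YES" else "NO" := by
  simp only [primeString_alt, PySem.Dict.foldl_insert_getD_add_one_eq_counter]
  obtain ⟨mv, hmv⟩ : ∃ mv, PySem.List.max?
      ((PySem.Dict.counter arr).values ++ [((PySem.Dict.counter arr).size : Int)])
      (fun t => t) = some mv := by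
    cases h : PySem.List.max?
        ((PySem.Dict.counter arr).values ++ [((PySem.Dict.counter arr).size : Int)])
        (fun t => t) with
    | none => exact absurd ((PySem.List.max?_eq_none_iff _ _).mp h) (by simp)
    | some mv => exact ⟨mv, rfl⟩
  simp only [hmv, Option.getD_some]
  congr 1
  apply congrArg (fun b : Bool => b = true)
  refine pvAll_congr _ _ _ (fun t ht => ?_)
  have ht0 : 0 ≤ t := by
    rcases List.mem_append.mp ht with h | h
    · exact pvValues_nonneg arr t h
    · simp only [List.mem_singleton] at h
      omega
  have htm : t ≤ mv := by
    have := PySem.List.max?_isMax hmv t ht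
    simpa using this
  rw [PySem.List.pyGet?_of_nonneg _ ht0, ← List.getD_eq_getElem?_getD,
    pvSieve_getD mv t ht0 htm]

-- ===== VERDICT (by name: the statement is the Claim_ definition above) =====
theorem primeString_spec : Claim_equal_primeString := by
  intro arr _
  unfold Spec_primeString
  rw [pvA_eq, pvB_eq]
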